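-- pv_equiv track=rewrite | github.com/Oreochococukie/mindfresh | mindfresh/onboarding.py | _parse_completed_steps
-- ===== SOURCE A (Python) =====
-- from enum import Enum
-- from typing import Any, Dict, Iterable, List, Mapping, Optional, Sequence
--
-- class OnboardingStep(str, Enum):
--     """Durable, non-secret checkpoints for guided onboarding."""
--
--     START = "start"
--     VAULT = "vault"
--     MODEL = "model"
--     API_KEYS = "api_keys"
--     DOCTOR = "doctor"
--     COMPLETE = "complete"
--
-- ONBOARDING_STEPS: Sequence[OnboardingStep] = (
--     OnboardingStep.START,
--     OnboardingStep.VAULT,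
--     OnboardingStep.MODEL,
--     OnboardingStep.API_KEYS,
--     OnboardingStep.DOCTOR,
--     OnboardingStep.COMPLETE,
-- )
--
-- def parse_onboarding_step(value: str) -> OnboardingStep:
--     for step in ONBOARDING_STEPS:
--         if step.value == value:
--             return step
--     return OnboardingStep.START
--
-- def _parse_completed_steps(raw: Any) -> List[OnboardingStep]:
--     if not isinstance(raw, list):
--         return []
--     parsed: List[OnboardingStep] = []
--     for item in raw:
--         if isinstance(item, str):
--             parsed.append(parse_onboarding_step(item))
--     return _dedupe_steps(parsed)
--
-- def _dedupe_steps(steps: Iterable[OnboardingStep]) -> List[OnboardingStep]: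
--     seen: set[OnboardingStep] = set()
--     ordered: List[OnboardingStep] = []
--     for step in steps:
--         if step not in seen:
--             seen.add(step)
--             ordered.append(step)
--     return ordered
-- ===== SOURCE B (Python) =====
-- from enum import Enum
-- from typing import Any, List
--
-- class OnboardingStep(str, Enum):
--     START = "start"
--     VAULT = "vault"
--     MODEL = "model"
--     API_KEYS = "api_keys"
--     DOCTOR = "doctor"
--     COMPLETE = "complete"
--
-- def _to_step(item: str) -> OnboardingStep:
--     try:
--         return OnboardingStep(item)
--     except ValueError:
--         return OnboardingStep.START
--
-- def _dedup_first(steps: List[OnboardingStep]) -> List[OnboardingStep]: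
--     # recursive dedupe: keep the head, filter every later copy of it out, recurse
--     if not steps:
--         return []
--     head = steps[0]
--     return [head] + _dedup_first([s for s in steps[1:] if s != head])
--
-- def _parse_completed_steps(raw: Any) -> List[OnboardingStep]:
--     if not isinstance(raw, list):
--         return []
--     return _dedup_first([_to_step(item) for item in raw if isinstance(item, str)])
-- ===== Notes on version B (the rewrite author's own statement) =====
-- stated objective: alternative
-- what changed: Replaces A's iterative seen-set dedupe over scan-parsed items with a recursive filter-based dedupe (keep the head, filter out its later copies, recurse) over a comprehension that converts each string via the enum constructor with a ValueError fallback; no seen set and no linear scan of the step tuple remain.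
import Mathlib
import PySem

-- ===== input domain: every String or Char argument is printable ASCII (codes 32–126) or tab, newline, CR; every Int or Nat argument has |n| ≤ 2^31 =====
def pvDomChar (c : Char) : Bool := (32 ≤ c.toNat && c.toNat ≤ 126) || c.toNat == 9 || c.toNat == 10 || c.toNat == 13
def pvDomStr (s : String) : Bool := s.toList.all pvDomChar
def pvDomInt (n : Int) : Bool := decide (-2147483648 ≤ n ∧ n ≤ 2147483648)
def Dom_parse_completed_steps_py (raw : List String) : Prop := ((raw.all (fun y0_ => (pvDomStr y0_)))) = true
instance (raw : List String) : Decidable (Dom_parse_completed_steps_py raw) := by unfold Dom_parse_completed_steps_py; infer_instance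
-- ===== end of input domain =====

-- B replaces A's seen-set dedupe of scan-parsed items with a recursive filter-based dedupe
-- over enum-constructor conversion; return values are equal (objective: alternative).

-- ===== PORT A =====
-- ONBOARDING_STEPS (the step values, in tuple order)
def pvStepValues : List String := ["start", "vault", "model", "api_keys", "doctor", "complete"]

-- parse_onboarding_step: for step in ONBOARDING_STEPS: if step.value == value: return step; return START
def pvStepScan : List String → String → String
  | [], _ => "start"
  | s :: rest, v => if s == v then s else pvStepScan rest v

def parse_onboarding_step_py (value : String) : String := pvStepScan pvStepValues value

-- _dedupe_steps: seen = set(); ordered = []; for step: if step not in seen: add + append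
def pvDedupeSteps (steps : List String) : List String :=
  (steps.foldl
    (fun (acc : PySem.Set String × List String) step =>
      if PySem.Set.contains acc.1 step then acc
      else (PySem.Set.add acc.1 step, acc.2 ++ [step]))
    (PySem.Set.empty, [])).2

-- _parse_completed_steps: raw is a list of str here, so the isinstance guards always pass
def parse_completed_steps_py (raw : List String) : List String :=
  pvDedupeSteps (raw.map (fun item => parse_onboarding_step_py item))

-- ===== PORT B =====
-- _to_step: OnboardingStep(item), ValueError fallback → START; exact on str input:
-- the constructor succeeds iff item is one of the enum's values
def pvToStepAlt (item : String) : String :=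
  if pvStepValues.contains item then item else "start"

-- _dedup_first: keep the head, filter later copies of it out of the tail, recurse
def pvDedupFirst : List String → List String
  | [] => []
  | x :: xs => x :: pvDedupFirst (xs.filter (fun s => s != x))
termination_by l => l.length
decreasing_by
  simpa using Nat.lt_succ_of_le (List.length_filter_le _ _)

def parse_completed_steps_py_alt (raw : List String) : List String :=
  pvDedupFirst (raw.map (fun item => pvToStepAlt item))

-- ===== PRECONDITION & SPEC =====
def Spec_parse_completed_steps_py (raw : List String) (out : List String) : Prop := out = parse_completed_steps_py_alt raw
instance (raw : List String) (out : List String) : Decidable (Spec_parse_completed_steps_py raw out) := by unfold Spec_parse_completed_steps_py; infer_instance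

-- ===== CLAIM (what is proved, stated in full; the proofs are below) =====
def Claim_equal_parse_completed_steps_py : Prop := ∀ (raw : List String), Dom_parse_completed_steps_py raw → Spec_parse_completed_steps_py raw (parse_completed_steps_py raw)

-- ===== LEMMAS AND PROOFS =====

-- A's scan over any list of values returns the value itself on a hit, else "start"
theorem pvStepScan_eq (l : List String) (v : String) :
    pvStepScan l v = if l.contains v then v else "start" := by
  induction l with
  | nil => simp [pvStepScan]
  | cons s rest ih =>
    by_cases h : s = v
    · subst h; simp [pvStepScan]
    · simp [pvStepScan, h, Ne.symm h, ih]

theorem pvParse_eq_toStep (v : String) : parse_onboarding_step_py v = pvToStepAlt v := by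
  simp [parse_onboarding_step_py, pvToStepAlt, pvStepScan_eq]

-- loop invariant: the seen-set foldl from state (s, acc) equals acc ++ the recursive
-- filter dedupe of the remaining items not already in s
theorem pvFoldl_eq_dedupFirst (n : Nat) :
    ∀ (xs : List String) (s : PySem.Set String) (acc : List String), xs.length ≤ n →
    (xs.foldl
      (fun (acc : PySem.Set String × List String) step =>
        if PySem.Set.contains acc.1 step then acc
        else (PySem.Set.add acc.1 step, acc.2 ++ [step]))
      (s, acc)).2
    = acc ++ pvDedupFirst (xs.filter (fun y => !(PySem.Set.contains s y))) := by
  induction n with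
  | zero =>
    intro xs s acc h
    have : xs = [] := List.length_eq_zero_iff.mp (Nat.le_zero.mp h)
    subst this; simp [pvDedupFirst]
  | succ n ih =>
    intro xs s acc h
    cases xs with
    | nil => simp [pvDedupFirst]
    | cons x xs =>
      have hlen : xs.length ≤ n := by simpa using Nat.le_of_succ_le_succ h
      by_cases hx : x ∈ s
      · have hc : PySem.Set.contains s x = true := by
          simp [PySem.Set.contains, hx]
        simp only [List.foldl_cons, hc, if_pos]
        rw [ih xs s acc hlen]
        simp [hx]
      · have hc : PySem.Set.contains s x = false := by
          simp [PySem.Set.contains, hx]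
        simp only [List.foldl_cons, hc, Bool.false_eq_true, if_false]
        rw [ih xs (PySem.Set.add s x) (acc ++ [x]) hlen]
        simp only [List.filter_cons, hc, Bool.not_false, if_pos]
        simp only [pvDedupFirst, List.append_assoc, List.cons_append, List.nil_append]
        congr 2
        congr 1
        rw [List.filter_filter]
        apply List.filter_congr
        intro y _
        by_cases hyx : y = x <;>
          simp [PySem.Set.add, PySem.Set.contains, hx, hyx]

-- ===== VERDICT (by name: the statement is the Claim_ definition above) =====
theorem parse_completed_steps_py_spec : Claim_equal_parse_completed_steps_py := by
  intro raw _
  unfold Spec_parse_completed_steps_py parse_completed_steps_py parse_completed_steps_py_alt pvDedupeSteps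
  rw [pvFoldl_eq_dedupFirst (raw.map (fun item => parse_onboarding_step_py item)).length _
      PySem.Set.empty [] le_rfl]
  simp [pvParse_eq_toStep, PySem.Set.empty, List.filter_eq_self.mpr]
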